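-- pv_equiv track=rewrite | github.com/AlexWUrobot/leetcode_python | min_changes_to_y.py | min_changes_to_y
-- ===== SOURCE A (Python) =====
-- def min_changes_to_y(matrix):
--     n = len(matrix)
--     possible_pairs = [(0, 1), (0, 2), (1, 0), (1, 2), (2, 0), (2, 1)]
--     min_changes = float('inf')
--
--     for y_val, bg_val in possible_pairs:
--         changes = 0
--         for i in range(n):
--             for j in range(n):
--                 if (j == i and i < n // 2) or (j == n - i - 1 and i < n // 2) or (j == n // 2 and i >= n // 2):
--                     if matrix[i][j] != y_val:
--                         changes += 1
--                 else:
--                     if matrix[i][j] != bg_val: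
--                         changes += 1
--         min_changes = min(min_changes, changes)
--
--     return min_changes
-- ===== SOURCE B (Python) =====
-- def min_changes_to_y(matrix):
--     n = len(matrix)
--     half = n // 2
--     y_tot = y0 = y1 = y2 = 0
--     bg_tot = bg0 = bg1 = bg2 = 0
--     for i, row in enumerate(matrix):
--         for j in range(n):
--             v = row[j]
--             if (i < half and (j == i or j == n - 1 - i)) or (i >= half and j == half):
--                 y_tot += 1
--                 if v == 0:
--                     y0 += 1
--                 elif v == 1:
--                     y1 += 1
--                 elif v == 2:
--                     y2 += 1
--             else:
--                 bg_tot += 1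
--                 if v == 0:
--                     bg0 += 1
--                 elif v == 1:
--                     bg1 += 1
--                 elif v == 2:
--                     bg2 += 1
--     candidates = [y_tot - yc + bg_tot - bgc
--                   for yc, bgc in [(y0, bg1), (y0, bg2), (y1, bg0), (y1, bg2), (y2, bg0), (y2, bg1)]]
--     return min(candidates)
-- ===== Notes on version B (the rewrite author's own statement) =====
-- stated objective: faster
-- what changed: A rescans the whole n x n matrix once per colour pair (6 full passes, re-evaluating the Y-cell predicate and one mismatch test per cell each pass); B makes a single classifying pass that tallies per-group totals and per-group counts of the values 0/1/2, then computes each pair's cost in O(1) as (y_tot - y_cnt) + (bg_tot - bg_cnt) and takes the minimum.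
import Mathlib
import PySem

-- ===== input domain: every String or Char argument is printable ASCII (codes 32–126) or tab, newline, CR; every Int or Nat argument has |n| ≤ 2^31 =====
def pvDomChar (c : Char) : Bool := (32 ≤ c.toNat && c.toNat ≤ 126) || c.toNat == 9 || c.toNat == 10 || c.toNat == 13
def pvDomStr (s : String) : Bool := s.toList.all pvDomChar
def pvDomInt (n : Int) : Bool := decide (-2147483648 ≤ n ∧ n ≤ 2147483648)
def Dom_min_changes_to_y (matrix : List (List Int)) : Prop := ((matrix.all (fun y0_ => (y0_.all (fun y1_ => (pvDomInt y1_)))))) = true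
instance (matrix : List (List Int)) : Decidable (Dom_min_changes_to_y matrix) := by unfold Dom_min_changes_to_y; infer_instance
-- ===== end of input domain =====

-- B replaces A's six full rescans of the matrix (one per colour pair) by a single
-- classifying pass building per-group value counts, then O(1) arithmetic per pair.

-- ===== PORT A =====
-- inner double loop of A for one (y_val, bg_val) pair; pyGetD is exact under Pre_ (indices in range)
def pvChangesA (matrix : List (List Int)) (n y b : Int) : Int :=
  (PySem.List.pyRange 0 n 1).foldl (fun c i =>
    (PySem.List.pyRange 0 n 1).foldl (fun c j =>
      if (j = i ∧ i < PySem.Int.floordiv n 2) ∨ (j = n - i - 1 ∧ i < PySem.Int.floordiv n 2) ∨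
         (j = PySem.Int.floordiv n 2 ∧ PySem.Int.floordiv n 2 ≤ i) then
        (if PySem.List.pyGetD (PySem.List.pyGetD matrix i []) j 0 ≠ y then c + 1 else c)
      else
        (if PySem.List.pyGetD (PySem.List.pyGetD matrix i []) j 0 ≠ b then c + 1 else c)) c) 0

def min_changes_to_y (matrix : List (List Int)) : Int :=
  let n : Int := matrix.length
  let possible_pairs : List (Int × Int) := [(0,1),(0,2),(1,0),(1,2),(2,0),(2,1)]
  -- float('inf') is ported as 'none'; the pairs loop always runs, so the result is always 'some'
  (possible_pairs.foldl (fun mc p =>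
      let changes := pvChangesA matrix n p.1 p.2
      some (match mc with | none => changes | some m => min m changes)) none).getD 0

-- ===== PORT B =====
structure PvSt where
  yt : Int
  y0 : Int
  y1 : Int
  y2 : Int
  bt : Int
  g0 : Int
  g1 : Int
  g2 : Int
deriving DecidableEq, Repr

-- body of B's inner loop: classify cell (i, j) with value row[j] and bump the counters
def pvStepB (n i : Int) (row : List Int) (s : PvSt) (j : Int) : PvSt :=
  let half := PySem.Int.floordiv n 2
  let v := PySem.List.pyGetD row j 0
  if (i < half ∧ (j = i ∨ j = n - 1 - i)) ∨ (half ≤ i ∧ j = half) then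
    if v = 0 then { s with yt := s.yt + 1, y0 := s.y0 + 1 }
    else if v = 1 then { s with yt := s.yt + 1, y1 := s.y1 + 1 }
    else if v = 2 then { s with yt := s.yt + 1, y2 := s.y2 + 1 }
    else { s with yt := s.yt + 1 }
  else
    if v = 0 then { s with bt := s.bt + 1, g0 := s.g0 + 1 }
    else if v = 1 then { s with bt := s.bt + 1, g1 := s.g1 + 1 }
    else if v = 2 then { s with bt := s.bt + 1, g2 := s.g2 + 1 }
    else { s with bt := s.bt + 1 }

-- B's single counting pass: for i, row in enumerate(matrix): for j in range(n): ...
def pvRunB (matrix : List (List Int)) : PvSt :=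
  (PySem.List.enumerate matrix 0).foldl
    (fun s ir => (PySem.List.pyRange 0 (matrix.length : Int) 1).foldl (pvStepB (matrix.length : Int) ir.1 ir.2) s)
    ⟨0, 0, 0, 0, 0, 0, 0, 0⟩

def min_changes_to_y_alt (matrix : List (List Int)) : Int :=
  let s := pvRunB matrix
  let candidates := ([(s.y0, s.g1), (s.y0, s.g2), (s.y1, s.g0), (s.y1, s.g2), (s.y2, s.g0), (s.y2, s.g1)]).map
    (fun p => s.yt - p.1 + s.bt - p.2)
  match PySem.List.min? candidates (fun x => x) with
  | some m => m
  | none => 0    -- unreachable: candidates has six elements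

-- ===== PRECONDITION & SPEC =====
-- Pre_ excludes ragged matrices (some row shorter than the number of rows), on which the
-- Python A raises IndexError at matrix[i][j].
def Pre_min_changes_to_y (matrix : List (List Int)) : Prop :=
  ∀ row ∈ matrix, matrix.length ≤ row.length
instance (matrix : List (List Int)) : Decidable (Pre_min_changes_to_y matrix) := by
  unfold Pre_min_changes_to_y; infer_instance

def pvWitness_min_changes_to_y : List (List Int) := [[0, 1], [2, 1]]

def Spec_min_changes_to_y (matrix : List (List Int)) (out : Int) : Prop := out = min_changes_to_y_alt matrix
instance (matrix : List (List Int)) (out : Int) : Decidable (Spec_min_changes_to_y matrix out) := by unfold Spec_min_changes_to_y; infer_instance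

-- ===== CLAIM (what is proved, stated in full; the proofs are below) =====
def Claim_equal_min_changes_to_y : Prop := ∀ (matrix : List (List Int)), Dom_min_changes_to_y matrix → Pre_min_changes_to_y matrix → Spec_min_changes_to_y matrix (min_changes_to_y matrix)

-- ===== LEMMAS AND PROOFS =====

-- cost contributed by cell (i, j) holding value v, for pair (y, b), in A's phrasing
def pvCost (n y b i j v : Int) : Int :=
  if (j = i ∧ i < PySem.Int.floordiv n 2) ∨ (j = n - i - 1 ∧ i < PySem.Int.floordiv n 2) ∨
     (j = PySem.Int.floordiv n 2 ∧ PySem.Int.floordiv n 2 ≤ i) then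
    (if v ≠ y then 1 else 0)
  else
    (if v ≠ b then 1 else 0)

def pvSelY (s : PvSt) (y : Int) : Int := if y = 0 then s.y0 else if y = 1 then s.y1 else s.y2
def pvSelG (s : PvSt) (b : Int) : Int := if b = 0 then s.g0 else if b = 1 then s.g1 else s.g2

def pvH (y b : Int) (s : PvSt) : Int := s.yt - pvSelY s y + s.bt - pvSelG s b

theorem pv_foldl_hom {α σ : Type} (L : List α) (f : σ → α → σ) (g : α → Int) (h : σ → Int)
    (H : ∀ s a, h (f s a) = h s + g a) (s : σ) :
    h (L.foldl f s) = h s + (L.map g).sum := by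
  induction L generalizing s with
  | nil => simp
  | cons x t ih => simp only [List.foldl_cons, List.map_cons, List.sum_cons, ih, H]; ring

theorem pvChangesA_eq_sum (matrix : List (List Int)) (n y b : Int) :
    pvChangesA matrix n y b =
      ((PySem.List.pyRange 0 n 1).map (fun i =>
        ((PySem.List.pyRange 0 n 1).map (fun j =>
          pvCost n y b i j (PySem.List.pyGetD (PySem.List.pyGetD matrix i []) j 0))).sum)).sum := by
  unfold pvChangesA
  have inner : ∀ (i : Int) (c : Int),
      (PySem.List.pyRange 0 n 1).foldl (fun c j =>
        if (j = i ∧ i < PySem.Int.floordiv n 2) ∨ (j = n - i - 1 ∧ i < PySem.Int.floordiv n 2) ∨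
           (j = PySem.Int.floordiv n 2 ∧ PySem.Int.floordiv n 2 ≤ i) then
          (if PySem.List.pyGetD (PySem.List.pyGetD matrix i []) j 0 ≠ y then c + 1 else c)
        else
          (if PySem.List.pyGetD (PySem.List.pyGetD matrix i []) j 0 ≠ b then c + 1 else c)) c
      = c + ((PySem.List.pyRange 0 n 1).map (fun j =>
          pvCost n y b i j (PySem.List.pyGetD (PySem.List.pyGetD matrix i []) j 0))).sum := by
    intro i c
    exact pv_foldl_hom _ _ _ (fun x => x) (by
      intro s j; unfold pvCost; split_ifs <;> simp_all) c
  have outer := pv_foldl_hom (PySem.List.pyRange 0 n 1)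
    (fun c i => (PySem.List.pyRange 0 n 1).foldl (fun c j =>
        if (j = i ∧ i < PySem.Int.floordiv n 2) ∨ (j = n - i - 1 ∧ i < PySem.Int.floordiv n 2) ∨
           (j = PySem.Int.floordiv n 2 ∧ PySem.Int.floordiv n 2 ≤ i) then
          (if PySem.List.pyGetD (PySem.List.pyGetD matrix i []) j 0 ≠ y then c + 1 else c)
        else
          (if PySem.List.pyGetD (PySem.List.pyGetD matrix i []) j 0 ≠ b then c + 1 else c)) c)
    (fun i => ((PySem.List.pyRange 0 n 1).map (fun j =>
          pvCost n y b i j (PySem.List.pyGetD (PySem.List.pyGetD matrix i []) j 0))).sum)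
    (fun x => x)
    (by intro s i; exact inner i s) 0
  simpa using outer

theorem pv_cell (nn hh i j v y b : Int)
    (hy : y = 0 ∨ y = 1 ∨ y = 2) (hb : b = 0 ∨ b = 1 ∨ b = 2) (s : PvSt) :
    pvH y b (if (i < hh ∧ (j = i ∨ j = nn - 1 - i)) ∨ (hh ≤ i ∧ j = hh) then
        (if v = 0 then { s with yt := s.yt + 1, y0 := s.y0 + 1 }
         else if v = 1 then { s with yt := s.yt + 1, y1 := s.y1 + 1 }
         else if v = 2 then { s with yt := s.yt + 1, y2 := s.y2 + 1 }
         else { s with yt := s.yt + 1 })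
      else
        (if v = 0 then { s with bt := s.bt + 1, g0 := s.g0 + 1 }
         else if v = 1 then { s with bt := s.bt + 1, g1 := s.g1 + 1 }
         else if v = 2 then { s with bt := s.bt + 1, g2 := s.g2 + 1 }
         else { s with bt := s.bt + 1 }))
      = pvH y b s +
        (if (j = i ∧ i < hh) ∨ (j = nn - i - 1 ∧ i < hh) ∨ (j = hh ∧ hh ≤ i) then
          (if v ≠ y then 1 else 0) else (if v ≠ b then 1 else 0)) := by
  by_cases hp : (j = i ∧ i < hh) ∨ (j = nn - i - 1 ∧ i < hh) ∨ (j = hh ∧ hh ≤ i)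
  · have hp' : (i < hh ∧ (j = i ∨ j = nn - 1 - i)) ∨ (hh ≤ i ∧ j = hh) := by omega
    rw [if_pos hp', if_pos hp]
    rcases hy with rfl | rfl | rfl <;>
      simp only [pvH, pvSelY, pvSelG] <;> split_ifs <;> simp only [] <;> omega
  · have hp' : ¬ ((i < hh ∧ (j = i ∨ j = nn - 1 - i)) ∨ (hh ≤ i ∧ j = hh)) := by omega
    rw [if_neg hp', if_neg hp]
    rcases hb with rfl | rfl | rfl <;>
      simp only [pvH, pvSelY, pvSelG] <;> split_ifs <;> simp only [] <;> omega

theorem pvStepB_hom (n i : Int) (row : List Int) (y b : Int)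
    (hy : y = 0 ∨ y = 1 ∨ y = 2) (hb : b = 0 ∨ b = 1 ∨ b = 2) (s : PvSt) (j : Int) :
    pvH y b (pvStepB n i row s j) = pvH y b s + pvCost n y b i j (PySem.List.pyGetD row j 0) := by
  simp only [pvStepB, pvCost]
  exact pv_cell n (PySem.Int.floordiv n 2) i j (PySem.List.pyGetD row j 0) y b hy hb s

theorem pvRunB_eq_sum (matrix : List (List Int)) (y b : Int)
    (hy : y = 0 ∨ y = 1 ∨ y = 2) (hb : b = 0 ∨ b = 1 ∨ b = 2) :
    pvH y b (pvRunB matrix) =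
      ((PySem.List.pyRange 0 (matrix.length : Int) 1).map (fun i =>
        ((PySem.List.pyRange 0 (matrix.length : Int) 1).map (fun j =>
          pvCost (matrix.length : Int) y b i j
            (PySem.List.pyGetD (PySem.List.pyGetD matrix i []) j 0))).sum)).sum := by
  unfold pvRunB
  rw [PySem.List.enumerate_eq_map_pyRange matrix ([] : List Int), List.foldl_map]
  simp only [PySem.List.len_eq]
  have step := pv_foldl_hom (PySem.List.pyRange 0 (matrix.length : Int) 1)
    (fun s i => (PySem.List.pyRange 0 (matrix.length : Int) 1).foldl
        (pvStepB (matrix.length : Int) i (PySem.List.pyGetD matrix i [])) s)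
    (fun i => ((PySem.List.pyRange 0 (matrix.length : Int) 1).map (fun j =>
          pvCost (matrix.length : Int) y b i j
            (PySem.List.pyGetD (PySem.List.pyGetD matrix i []) j 0))).sum)
    (pvH y b)
    (by
      intro s i
      exact pv_foldl_hom _ _ _ (pvH y b)
        (fun s j => pvStepB_hom (matrix.length : Int) i (PySem.List.pyGetD matrix i []) y b hy hb s j) s)
    ⟨0, 0, 0, 0, 0, 0, 0, 0⟩
  have h0 : pvH y b ⟨0, 0, 0, 0, 0, 0, 0, 0⟩ = 0 := by
    unfold pvH pvSelY pvSelG; split_ifs <;> rfl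
  rw [step, h0, zero_add]

theorem pvChangesA_eq_B (matrix : List (List Int)) (y b : Int)
    (hy : y = 0 ∨ y = 1 ∨ y = 2) (hb : b = 0 ∨ b = 1 ∨ b = 2) :
    pvChangesA matrix (matrix.length : Int) y b = pvH y b (pvRunB matrix) := by
  rw [pvChangesA_eq_sum, pvRunB_eq_sum matrix y b hy hb]

-- ===== VERDICT (by name: the statement is the Claim_ definition above) =====
theorem min_changes_to_y_spec : Claim_equal_min_changes_to_y := by
  intro matrix _ _
  unfold Spec_min_changes_to_y min_changes_to_y min_changes_to_y_alt
  simp only [List.foldl_cons, List.foldl_nil, List.map_cons, List.map_nil]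
  rw [pvChangesA_eq_B matrix 0 1 (by tauto) (by tauto),
      pvChangesA_eq_B matrix 0 2 (by tauto) (by tauto),
      pvChangesA_eq_B matrix 1 0 (by tauto) (by tauto),
      pvChangesA_eq_B matrix 1 2 (by tauto) (by tauto),
      pvChangesA_eq_B matrix 2 0 (by tauto) (by tauto),
      pvChangesA_eq_B matrix 2 1 (by tauto) (by tauto)]
  rw [PySem.List.min?_id_cons]
  unfold pvH pvSelY pvSelG
  norm_num
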